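-- pv_equiv track=rewrite | github.com/dcsch/pyif | pyif/util.py | compress_whitespace
-- ===== SOURCE A (Python) =====
-- def is_whitespace(c):
--     if c == " " or c == "\t" or c == "\n":
--         return True
--     return False
--
-- def compress_whitespace(str):
--     """
--     Remove extraneous whitespace from the string, that being all whitespace at the beginning
--     and end of the string and anything beyond a single space within the string.
--     """
--
--     new_str = ""
--     in_text = False
--     for i in range(len(str)):
--         c = str[i]
--         if is_whitespace(c):
--             if not in_text:
--
--                 # Before any text, so ignore
--                 pass
--             else:
--
--                 # We're leaving text, so we allow one space and ignore all others
--                 new_str += " "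
--                 in_text = False
--         else:
--             # Handling text
--             new_str += c
--             in_text = True
--     if new_str[-1:] == " ":
--         new_str = new_str[:-1]
--     return new_str
-- ===== SOURCE B (Python) =====
-- def compress_whitespace(str):
--     collapsed = "".join(" " if c in " \t\n" else c for c in str)
--     return " ".join(w for w in collapsed.split(" ") if w)
-- ===== Notes on version B (the rewrite author's own statement) =====
-- stated objective: idiomatic
-- what changed: Replaced the character-by-character state machine (in_text flag, manual trailing-space trim) by a translate/split/join pipeline: map tab and newline to spaces, split on the space character, drop empty pieces, join with single spaces.
import Mathlib
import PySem

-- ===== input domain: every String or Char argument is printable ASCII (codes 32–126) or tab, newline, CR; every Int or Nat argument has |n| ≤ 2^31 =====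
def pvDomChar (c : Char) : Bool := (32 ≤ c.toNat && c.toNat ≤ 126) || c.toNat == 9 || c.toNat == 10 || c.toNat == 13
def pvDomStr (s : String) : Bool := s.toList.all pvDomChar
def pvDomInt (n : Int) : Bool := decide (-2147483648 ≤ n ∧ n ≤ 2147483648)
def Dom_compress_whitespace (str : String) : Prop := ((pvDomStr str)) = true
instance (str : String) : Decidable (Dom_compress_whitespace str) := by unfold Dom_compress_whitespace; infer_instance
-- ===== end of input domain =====

-- B replaces A's character-by-character state machine by a translate / split-on-space / join pipeline; same return value on every input.

-- ===== PORT A =====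
def is_whitespace (c : Char) : Bool :=
  if c = ' ' || c = '\t' || c = '\n' then true else false

def compress_whitespace (str : String) : String :=
  let p := (PySem.List.pyRange 0 (PySem.Str.len str) 1).foldl
    (fun (st : List Char × Bool) i =>
      let c := PySem.List.pyGetD str.toList i ' '
      if is_whitespace c then
        if !st.2 then st
        else (st.1 ++ [' '], false)
      else (st.1 ++ [c], true))
    ([], false)
  let new_str := p.1
  let new_str := if PySem.List.slice new_str (some (-1)) none = [' ']
                 then PySem.List.slice new_str none (some (-1)) else new_str
  String.ofList new_str

-- ===== PORT B =====
def compress_whitespace_alt (str : String) : String :=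
  let collapsed := PySem.Chars.join []
    (str.toList.map (fun c => if c = ' ' || c = '\t' || c = '\n' then [' '] else [c]))
  String.ofList (PySem.Chars.join [' ']
    ((PySem.Chars.splitOn collapsed [' ']).filter (fun w => !w.isEmpty)))

-- ===== PRECONDITION & SPEC =====
def Spec_compress_whitespace (str : String) (out : String) : Prop := out = compress_whitespace_alt str
instance (str : String) (out : String) : Decidable (Spec_compress_whitespace str out) := by unfold Spec_compress_whitespace; infer_instance

-- ===== CLAIM (what is proved, stated in full; the proofs are below) =====
def Claim_equal_compress_whitespace : Prop := ∀ (str : String), Dom_compress_whitespace str → Spec_compress_whitespace str (compress_whitespace str)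

-- ===== LEMMAS AND PROOFS =====

lemma splitOn_go_eq (c : Char) : ∀ (fuel : Nat) (l cur : List Char) (acc : List (List Char)), l.length < fuel →
    PySem.Chars.splitOn.go [c] fuel l cur acc
      = acc.reverse ++ (List.splitOnP (fun a => a == c) l).modifyHead (cur.reverse ++ ·) := by
  intro fuel
  induction fuel with
  | zero => intro l cur acc h; omega
  | succ f ih =>
    intro l cur acc h
    cases l with
    | nil => simp [PySem.Chars.splitOn.go, List.splitOnP_nil]
    | cons a rest =>
      rw [PySem.Chars.splitOn.go]
      by_cases hc : a = c
      · subst hc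
        simp only [List.isPrefixOf, beq_self_eq_true, Bool.true_and,
          if_pos, List.splitOnP_cons]
        simp only [List.length_cons, List.length_nil, List.drop_succ_cons, List.drop_zero]
        rw [ih rest [] (cur.reverse :: acc) (by simpa using Nat.lt_of_succ_lt_succ h)]
        cases h' : List.splitOnP (fun x => x == a) rest <;> simp
      · have hpre : List.isPrefixOf [c] (a :: rest) = false := by
          simp [List.isPrefixOf]; exact fun hh => absurd hh.symm hc
        rw [if_neg (by simp [hpre])]
        rw [ih rest (a :: cur) acc (by simpa using Nat.lt_of_succ_lt_succ h)]
        have hsp : List.splitOnP (fun x => x == c) (a :: rest)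
            = List.modifyHead (List.cons a) (List.splitOnP (fun x => x == c) rest) := by
          rw [List.splitOnP_cons]; simp [hc]
        rw [hsp]
        obtain ⟨w, r, hr⟩ : ∃ w r, List.splitOnP (fun x => x == c) rest = w :: r := by
          cases hsr : List.splitOnP (fun x => x == c) rest with
          | nil => exact absurd hsr (List.splitOnP_ne_nil _ _)
          | cons w r => exact ⟨w, r, rfl⟩
        simp [hr]

lemma splitOn_singleton (c : Char) (l : List Char) :
    PySem.Chars.splitOn l [c] = List.splitOnP (fun a => a == c) l := by
  rw [PySem.Chars.splitOn, splitOn_go_eq c (l.length+1) l [] [] (by omega)]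
  cases h' : List.splitOnP (fun x => x == c) l <;> simp

lemma splitOnP_map_tr (cs : List Char) :
    List.splitOnP (fun a => a == ' ')
        (cs.map (fun c => if is_whitespace c then ' ' else c))
      = List.splitOnP is_whitespace cs := by
  induction cs with
  | nil => simp
  | cons a t ih =>
    by_cases ha : is_whitespace a = true
    · simp [List.splitOnP_cons, ha, ih]
    · have ha' : (a == ' ') = false := by
        simp only [is_whitespace] at ha
        simp; rintro rfl; simp at ha
      simp [List.splitOnP_cons, ha, ha', ih]

lemma anyText_iff (p : Char → Bool) (l : List Char) :
    ((List.splitOnP p l).filter (fun w => !w.isEmpty) = []) ↔ l.any (fun c => !p c) = false := by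
  induction l with
  | nil => simp
  | cons a t ih =>
    by_cases ha : p a = true
    · simp [List.splitOnP_cons, ha, ih]
    · obtain ⟨w, r, hr⟩ : ∃ w r, List.splitOnP p t = w :: r := by
        cases hsr : List.splitOnP p t with
        | nil => exact absurd hsr (List.splitOnP_ne_nil _ _)
        | cons w r => exact ⟨w, r, rfl⟩
      simp [List.splitOnP_cons, ha, hr]

lemma chunks_no_sep (p : Char → Bool) (l : List Char) : ∀ (w : List Char), w ∈ List.splitOnP p l →
    ∀ a ∈ w, p a = false := by
  induction l with
  | nil => intro w hw a haw; simp [List.splitOnP_nil] at hw; subst hw; simp at haw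
  | cons x t ih =>
    intro w hw a haw
    by_cases hx : p x = true
    · rw [List.splitOnP_cons, if_pos hx] at hw
      rcases List.mem_cons.mp hw with h | h
      · subst h; simp at haw
      · exact ih w h a haw
    · rw [List.splitOnP_cons, if_neg hx] at hw
      obtain ⟨v, r, hr⟩ : ∃ v r, List.splitOnP p t = v :: r := by
        cases hsr : List.splitOnP p t with
        | nil => exact absurd hsr (List.splitOnP_ne_nil _ _)
        | cons v r => exact ⟨v, r, rfl⟩
      rw [hr, List.modifyHead_cons] at hw
      rcases List.mem_cons.mp hw with h | h
      · subst h
        rcases List.mem_cons.mp haw with h' | h'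
        · subst h'; simpa using hx
        · exact ih v (by simp [hr]) a h'
      · exact ih w (by simp [hr, h]) a haw

def gEmit : List Char → Bool → List Char
  | [], _ => []
  | c :: t, b =>
    if is_whitespace c then
      (if b then ' ' :: gEmit t false else gEmit t false)
    else c :: gEmit t true

def jWords (l : List (List Char)) : List Char :=
  List.intercalate [' '] (l.filter (fun w => !w.isEmpty))

def padB (cs : List Char) : Bool :=
  is_whitespace (cs.getLastD 'x') && cs.any (fun c => !is_whitespace c)

def leadB (cs : List Char) : Bool := is_whitespace (cs.headD 'x')

lemma getLastD_ws (t : List Char) (d : Char) (ht : t ≠ [])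
    (h : ∀ c ∈ t, is_whitespace c = true) : is_whitespace (t.getLastD d) = true := by
  apply h
  rw [List.getLastD_eq_getLast?]
  cases hl : t.getLast? with
  | none => exact absurd (List.getLast?_eq_none_iff.mp hl) ht
  | some a => exact List.mem_of_getLast? hl

lemma intercalate_cons₂ (sep x y : List Char) (zs : List (List Char)) :
    List.intercalate sep (x :: y :: zs) = x ++ sep ++ List.intercalate sep (y :: zs) := by
  simp [List.intercalate]

lemma intercalate_single (sep x : List Char) : List.intercalate sep [x] = x := by
  simp [List.intercalate]

lemma key (cs : List Char) :
    gEmit cs false = jWords (List.splitOnP is_whitespace cs) ++ (if padB cs then [' '] else [])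
    ∧ gEmit cs true = (if leadB cs then [' '] else []) ++ jWords (List.splitOnP is_whitespace cs) ++ (if padB cs then [' '] else []) := by
  induction cs with
  | nil => refine ⟨?_, ?_⟩ <;> simp [gEmit, jWords, padB, leadB] <;> decide
  | cons a t ih =>
    obtain ⟨ih1, ih2⟩ := ih
    by_cases ha : is_whitespace a = true
    · have hpad : padB (a :: t) = padB t := by
        cases t with
        | nil => simp [padB, ha]
        | cons y ys => simp [padB, ha]
      have hJ : jWords (List.splitOnP is_whitespace (a :: t)) = jWords (List.splitOnP is_whitespace t) := by
        simp [jWords, List.splitOnP_cons, ha]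
      have h1 : gEmit (a :: t) false = jWords (List.splitOnP is_whitespace (a :: t)) ++ (if padB (a :: t) then [' '] else []) := by
        simp only [gEmit, ha, if_pos, Bool.false_eq_true, if_false, hpad, hJ]
        exact ih1
      refine ⟨h1, ?_⟩
      simp only [gEmit, ha, if_pos, leadB, List.headD_cons, hpad, hJ]
      rw [ih1]; simp
    · have goal1 : gEmit (a :: t) false = jWords (List.splitOnP is_whitespace (a :: t)) ++ (if padB (a :: t) then [' '] else []) := by
        have hg : gEmit (a :: t) false = a :: gEmit t true := by simp [gEmit, ha]
        cases t with
        | nil =>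
          simp [gEmit, jWords, List.splitOnP_cons, List.splitOnP_nil, ha, padB,
            intercalate_single]
        | cons y ys =>
          obtain ⟨w, r, hr⟩ : ∃ w r, List.splitOnP is_whitespace (y :: ys) = w :: r := by
            cases hsr : List.splitOnP is_whitespace (y :: ys) with
            | nil => exact absurd hsr (List.splitOnP_ne_nil _ _)
            | cons w r => exact ⟨w, r, rfl⟩
          have hS : List.splitOnP is_whitespace (a :: y :: ys) = (a :: w) :: r := by
            rw [List.splitOnP_cons, if_neg (by simp [ha]), hr, List.modifyHead_cons]
          have hpadeq : padB (a :: y :: ys) = (is_whitespace ((y :: ys).getLastD 'x') && true) := by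
            simp [padB, ha]
          by_cases hy : is_whitespace y = true
          · -- w = [], r = splitOnP ys
            have hw : w = [] ∧ r = List.splitOnP is_whitespace ys := by
              rw [List.splitOnP_cons, if_pos hy] at hr
              exact ⟨(List.cons.injEq _ _ _ _ ▸ hr).1.symm, ((List.cons.injEq _ _ _ _) ▸ hr).2.symm⟩
            obtain ⟨hw0, hr0⟩ := hw
            subst hw0
            have hJt : jWords (List.splitOnP is_whitespace (y :: ys)) = List.intercalate [' '] (r.filter (fun v => !v.isEmpty)) := by
              rw [hr]; simp [jWords]
            have hlead : leadB (y :: ys) = true := by simp [leadB, hy]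
            rw [hg, ih2, hJt, hlead, hS]
            by_cases hF : r.filter (fun v => !v.isEmpty) = []
            · -- t is all whitespace
              have hanyt : (y :: ys).any (fun c => !is_whitespace c) = false := by
                rw [← anyText_iff is_whitespace (y :: ys), hr]
                simp [hF]
              have hallt : ∀ c ∈ (y :: ys), is_whitespace c = true := by
                intro c hc
                have := List.any_eq_false.mp hanyt c hc
                simpa using this
              have hpadt : padB (y :: ys) = false := by simp [padB, hanyt]
              have hpadat : padB (a :: y :: ys) = true := by
                rw [hpadeq, Bool.and_true]
                exact getLastD_ws (y :: ys) 'x' (by simp) hallt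
              have hJat : jWords ([a] :: r) = [a] := by
                simp only [jWords, List.filter_cons]
                rw [show (!([a] : List Char).isEmpty) = true by simp]
                simp only [if_pos, hF]
                exact intercalate_single _ _
              rw [hpadt, hpadat, hJat, hF]
              simp [List.intercalate]
            · have hanyt : (y :: ys).any (fun c => !is_whitespace c) = true := by
                by_contra hco
                have h2 := (anyText_iff is_whitespace (y :: ys)).mpr (by simpa using hco)
                rw [hr] at h2
                simp at h2
                exact hF (List.filter_eq_nil_iff.mpr (fun v hv => by simp [h2 v hv]))
              have hpadt : padB (a :: y :: ys) = padB (y :: ys) := by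
                rw [hpadeq]; simp [padB, hanyt]
              obtain ⟨f, fs, hFc⟩ : ∃ f fs, r.filter (fun v => !v.isEmpty) = f :: fs := by
                cases hFc : r.filter (fun v => !v.isEmpty) with
                | nil => exact absurd hFc hF
                | cons f fs => exact ⟨f, fs, rfl⟩
              have hJat : jWords ([a] :: r) = [a] ++ [' '] ++ List.intercalate [' '] (f :: fs) := by
                have hfil : (([a] :: r).filter (fun v => !v.isEmpty)) = [a] :: f :: fs := by
                  simp [hFc]
                simp only [jWords]
                rw [hfil, intercalate_cons₂]
              rw [hJat, hpadt, hFc]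
              simp
          · -- y is text: w nonempty
            obtain ⟨w0, hw⟩ : ∃ w0, w = y :: w0 := by
              rw [List.splitOnP_cons, if_neg (by simp [hy])] at hr
              obtain ⟨v, r2, hv⟩ : ∃ v r2, List.splitOnP is_whitespace ys = v :: r2 := by
                cases hsr : List.splitOnP is_whitespace ys with
                | nil => exact absurd hsr (List.splitOnP_ne_nil _ _)
                | cons v r2 => exact ⟨v, r2, rfl⟩
              rw [hv, List.modifyHead_cons] at hr
              exact ⟨v, ((List.cons.injEq _ _ _ _) ▸ hr).1.symm⟩
            have hanyt : (y :: ys).any (fun c => !is_whitespace c) = true := by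
              simp [List.any_cons, hy]
            have hpadt : padB (a :: y :: ys) = padB (y :: ys) := by
              rw [hpadeq]; simp [padB, hanyt]
            have hlead : leadB (y :: ys) = false := by simp [leadB, hy]
            have hJt : jWords (List.splitOnP is_whitespace (y :: ys))
                = w ++ (if r.filter (fun v => !v.isEmpty) = [] then [] else [' '] ++ List.intercalate [' '] (r.filter (fun v => !v.isEmpty))) := by
              rw [hr]
              have hfil : ((w :: r).filter (fun v => !v.isEmpty)) = w :: r.filter (fun v => !v.isEmpty) := by
                simp [hw]
              simp only [jWords]
              rw [hfil]
              cases hFc : r.filter (fun v => !v.isEmpty) with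
              | nil => simp [intercalate_single]
              | cons f fs => rw [intercalate_cons₂]; simp
            have hJat : jWords ((a :: w) :: r)
                = (a :: w) ++ (if r.filter (fun v => !v.isEmpty) = [] then [] else [' '] ++ List.intercalate [' '] (r.filter (fun v => !v.isEmpty))) := by
              have hfil : (((a :: w) :: r).filter (fun v => !v.isEmpty)) = (a :: w) :: r.filter (fun v => !v.isEmpty) := by
                simp
              simp only [jWords]
              rw [hfil]
              cases hFc : r.filter (fun v => !v.isEmpty) with
              | nil => simp [intercalate_single]
              | cons f fs => rw [intercalate_cons₂]; simp
            rw [hg, ih2, hJt, hlead, hS, hJat, hpadt]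
            simp
      have hlead : leadB (a :: t) = false := by simp [leadB, ha]
      exact ⟨goal1, by rw [hlead]; simpa [gEmit, ha] using goal1⟩

def aStep (st : List Char × Bool) (c : Char) : List Char × Bool :=
  if is_whitespace c then
    if !st.2 then st else (st.1 ++ [' '], false)
  else (st.1 ++ [c], true)

lemma foldA (cs : List Char) : ∀ (acc : List Char) (b : Bool),
    (cs.foldl aStep (acc, b)).1 = acc ++ gEmit cs b := by
  induction cs with
  | nil => intro acc b; simp [gEmit]
  | cons c t ih =>
    intro acc b
    rw [List.foldl_cons]
    by_cases hc : is_whitespace c = true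
    · cases b with
      | false =>
        rw [show aStep (acc, false) c = (acc, false) by simp [aStep, hc], ih]
        simp [gEmit, hc]
      | true =>
        rw [show aStep (acc, true) c = (acc ++ [' '], false) by simp [aStep, hc], ih]
        simp [gEmit, hc]
    · rw [show aStep (acc, b) c = (acc ++ [c], true) by simp [aStep, hc], ih]
      simp [gEmit, hc]

lemma jWords_getLast (l : List (List Char)) (h : ∀ w ∈ l, ¬w.isEmpty ∧ ∀ a ∈ w, a ≠ ' ') :
    (List.intercalate [' '] l).getLast? ≠ some ' ' := by
  induction l with
  | nil => simp [List.intercalate]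
  | cons w r ih =>
    cases r with
    | nil =>
      rw [intercalate_single]
      intro hlast
      exact (h w (by simp)).2 ' ' (List.mem_of_getLast? hlast) rfl
    | cons v r' =>
      rw [intercalate_cons₂, List.append_assoc, List.getLast?_append]
      have hvne : ¬(v.isEmpty = true) := (h v (by simp)).1
      have hne : List.intercalate [' '] (v :: r') ≠ [] := by
        cases r' with
        | nil =>
          rw [intercalate_single]
          intro hv; exact hvne (by simp [hv])
        | cons u r'' =>
          rw [intercalate_cons₂]
          intro hv
          simp only [List.append_assoc, List.append_eq_nil_iff] at hv
          exact hvne (by simp [hv.1])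
      have hI := ih (fun w hw => h w (by simp [hw]))
      obtain ⟨z, hz⟩ : ∃ z, (List.intercalate [' '] (v :: r')).getLast? = some z := by
        cases hg2 : (List.intercalate [' '] (v :: r')).getLast? with
        | none => exact absurd (List.getLast?_eq_none_iff.mp hg2) hne
        | some z => exact ⟨z, rfl⟩
      rw [List.getLast?_append, hz]
      simp only [Option.some_or]
      intro hcon
      exact hI (by rw [hz, Option.some_inj.mp hcon])

lemma drop_last_eq (l : List Char) :
    (List.drop (l.length - 1) l = [' ']) ↔ l.getLast? = some ' ' := by
  induction l using List.reverseRecOn with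
  | nil => simp
  | append_singleton xs x ih =>
    rw [List.getLast?_concat]
    constructor
    · intro h
      have hlen : (xs ++ [x]).length - 1 = xs.length := by simp
      rw [hlen, List.drop_append_of_le_length (by simp), List.drop_length] at h
      simp at h
      simp [h]
    · intro h
      have hx : x = ' ' := by simpa using h
      have hlen : (xs ++ [x]).length - 1 = xs.length := by simp
      rw [hlen, List.drop_append_of_le_length (by simp), List.drop_length, hx]
      simp

lemma a_eq_b (str : String) : compress_whitespace str = compress_whitespace_alt str := by
  unfold compress_whitespace compress_whitespace_alt
  set cs := str.toList with hcs
  -- B side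
  have hmapB : cs.map (fun c => if c = ' ' || c = '\t' || c = '\n' then [' '] else [c])
      = (cs.map (fun c => if is_whitespace c then ' ' else c)).map (fun c => [c]) := by
    rw [List.map_map]
    apply List.map_congr_left
    intro c _
    simp only [Function.comp, is_whitespace]
    by_cases h1 : (c = ' ' || c = '\t' || c = '\n') = true
    · simp [h1]
    · simp [h1]
  have hB : PySem.Chars.splitOn (PySem.Chars.join []
      (cs.map (fun c => if c = ' ' || c = '\t' || c = '\n' then [' '] else [c]))) [' ']
      = List.splitOnP is_whitespace cs := by
    rw [hmapB, PySem.Chars.join_nil_singletons, splitOn_singleton, splitOnP_map_tr]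
  -- A side
  have hA : (List.foldl (fun (st : List Char × Bool) i =>
        if is_whitespace (PySem.List.pyGetD cs i ' ') = true then
          if (!st.2) = true then st else (st.1 ++ [' '], false)
        else (st.1 ++ [PySem.List.pyGetD cs i ' '], true)) ([], false)
        (PySem.List.pyRange 0 (PySem.Str.len str))).1 = gEmit cs false := by
    rw [show PySem.Str.len str = ((cs.length : Nat) : Int) from PySem.Str.len_eq str]
    rw [show (fun (st : List Char × Bool) i =>
        if is_whitespace (PySem.List.pyGetD cs i ' ') = true then
          if (!st.2) = true then st else (st.1 ++ [' '], false)
        else (st.1 ++ [PySem.List.pyGetD cs i ' '], true))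
      = (fun acc j => aStep acc (PySem.List.pyGetD cs j ' ')) from rfl]
    rw [PySem.List.foldl_pyRange_zero_pyGetD' cs ' ' aStep ([], false)]
    exact foldA cs [] false
  simp only [hA, hB]
  have hjoin : PySem.Chars.join [' '] ((List.splitOnP is_whitespace cs).filter (fun w => !w.isEmpty))
      = jWords (List.splitOnP is_whitespace cs) := by
    simp [PySem.Chars.join, jWords, List.intercalate]
  rw [hjoin, (key cs).1]
  by_cases hpad : padB cs = true
  · rw [hpad, if_pos rfl]
    rw [PySem.List.slice_from_neg_one, PySem.List.slice_to_neg_one]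
    rw [if_pos ((drop_last_eq _).mpr (List.getLast?_concat))]
    rw [List.dropLast_concat]
  · rw [Bool.not_eq_true] at hpad
    rw [hpad]
    simp only [Bool.false_eq_true, if_false, List.append_nil]
    have hwords : ∀ w ∈ (List.splitOnP is_whitespace cs).filter (fun w => !w.isEmpty),
        ¬w.isEmpty = true ∧ ∀ a ∈ w, a ≠ ' ' := by
      intro w hw
      have hmem := List.mem_filter.mp hw
      refine ⟨by simpa using hmem.2, fun a ha => ?_⟩
      have hns := chunks_no_sep is_whitespace cs w hmem.1 a ha
      intro hsp
      rw [hsp] at hns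
      simp [is_whitespace] at hns
    have hlast := jWords_getLast _ hwords
    rw [if_neg]
    rw [PySem.List.slice_from_neg_one]
    intro hdrop
    exact hlast ((drop_last_eq _).mp hdrop)

-- ===== VERDICT (by name: the statement is the Claim_ definition above) =====
theorem compress_whitespace_spec : Claim_equal_compress_whitespace := by
  intro str _
  unfold Spec_compress_whitespace
  exact a_eq_b str
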